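-- pv_equiv track=rewrite | github.com/swjtu-dev-squad/socitwin | backend/app/memory/observation_shaper.py | _allocate_total_by_parent
-- ===== SOURCE A (Python) =====
-- def _allocate_total_by_parent(parent_lengths: list[int], total_cap: int) -> list[int]:
--     allocations = [0 for _ in parent_lengths]
--     remaining = max(0, total_cap)
--     if remaining <= 0:
--         return allocations
--
--     for index, parent_length in enumerate(parent_lengths):
--         if remaining <= 0:
--             break
--         if parent_length <= 0:
--             continue
--         allocations[index] = 1
--         remaining -= 1
--
--     if remaining <= 0:
--         return allocations
--
--     for index, parent_length in enumerate(parent_lengths):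
--         parent_cap = max(0, parent_length - allocations[index])
--         if parent_cap <= 0:
--             continue
--         extra = min(parent_cap, remaining)
--         allocations[index] += extra
--         remaining -= extra
--         if remaining <= 0:
--             break
--     return allocations
-- ===== SOURCE B (Python) =====
-- def _allocate_total_by_parent(parent_lengths: list[int], total_cap: int) -> list[int]:
--     cap = max(0, total_cap)
--     npos = sum(1 for length in parent_lengths if length > 0)
--     out = []
--     seen = 0      # number of positive-length parents before this one
--     prefix = 0    # sum of (length - 1) over positive-length parents before this one
--     for length in parent_lengths:
--         if length <= 0:
--             out.append(0)
--         elif cap < npos: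
--             # budget below the baseline: only the first `cap` positive parents get 1
--             out.append(1 if seen < cap else 0)
--             seen += 1
--         else:
--             # baseline 1 plus this parent's closed-form share of the leftover
--             out.append(1 + max(0, min(length - 1, cap - npos - prefix)))
--             seen += 1
--             prefix += length - 1
--     return out
-- ===== Notes on version B (the rewrite author's own statement) =====
-- stated objective: alternative
-- what changed: B replaces A's two mutating passes (baseline pass with break/continue, then a greedy fill pass over the allocations array) by a single pass that computes each parent's allocation directly from a closed-form formula over running prefix statistics (count of earlier positive parents and sum of their lengths minus one), never mutating or re-reading an allocations array.
import Mathlib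
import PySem

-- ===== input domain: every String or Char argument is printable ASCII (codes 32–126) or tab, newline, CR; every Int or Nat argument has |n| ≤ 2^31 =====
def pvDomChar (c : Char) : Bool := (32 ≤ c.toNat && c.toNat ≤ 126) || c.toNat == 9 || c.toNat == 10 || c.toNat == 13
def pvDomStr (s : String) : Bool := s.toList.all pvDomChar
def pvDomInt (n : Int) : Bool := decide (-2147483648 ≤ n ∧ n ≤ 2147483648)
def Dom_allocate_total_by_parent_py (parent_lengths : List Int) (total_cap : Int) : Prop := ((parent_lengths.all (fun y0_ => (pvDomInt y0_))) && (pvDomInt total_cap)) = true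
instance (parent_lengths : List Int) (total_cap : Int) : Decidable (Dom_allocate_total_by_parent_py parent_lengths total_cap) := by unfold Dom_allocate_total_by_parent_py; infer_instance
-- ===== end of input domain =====

-- B replaces A's two mutating passes by a single pass that computes each allocation
-- from a closed-form formula over running pre statistics (alternative, same cost).

-- ===== PORT A =====
-- first for-loop: break/continue become early return / plain recursion over enumerate
def pvAPhase1 : List (Int × Int) → List Int → Int → (List Int × Int)
  | [], alloc, rem => (alloc, rem)
  | (i, l) :: rest, alloc, rem =>
    if rem ≤ 0 then (alloc, rem)
    else if l ≤ 0 then pvAPhase1 rest alloc rem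
    else pvAPhase1 rest (PySem.List.pySetD alloc i 1) (rem - 1)

-- second for-loop; enumerate indices are always in range, so pyGetD/pySetD are exact here
def pvAPhase2 : List (Int × Int) → List Int → Int → (List Int × Int)
  | [], alloc, rem => (alloc, rem)
  | (i, l) :: rest, alloc, rem =>
    let pcap := max 0 (l - PySem.List.pyGetD alloc i 0)
    if pcap ≤ 0 then pvAPhase2 rest alloc rem
    else
      let extra := min pcap rem
      let alloc' := PySem.List.pySetD alloc i (PySem.List.pyGetD alloc i 0 + extra)
      let rem' := rem - extra
      if rem' ≤ 0 then (alloc', rem')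
      else pvAPhase2 rest alloc' rem'

def allocate_total_by_parent_py (parent_lengths : List Int) (total_cap : Int) : List Int :=
  let allocations := parent_lengths.map (fun _ => (0 : Int))
  let remaining := max 0 total_cap
  if remaining ≤ 0 then allocations
  else
    let s1 := pvAPhase1 (PySem.List.enumerate parent_lengths 0) allocations remaining
    if s1.2 ≤ 0 then s1.1
    else (pvAPhase2 (PySem.List.enumerate parent_lengths 0) s1.1 s1.2).1

-- ===== PORT B =====
-- Source B's single loop: builds the output element by element from the running state
-- (seen = positive parents so far, pre = sum of their (length-1))
def pvBLoop (cap npos : Int) : List Int → Int → Int → List Int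
  | [], _, _ => []
  | l :: rest, seen, pre =>
    if l ≤ 0 then 0 :: pvBLoop cap npos rest seen pre
    else if cap < npos then
      (if seen < cap then (1 : Int) else 0) :: pvBLoop cap npos rest (seen + 1) pre
    else
      (1 + max 0 (min (l - 1) (cap - npos - pre))) :: pvBLoop cap npos rest (seen + 1) (pre + (l - 1))

def allocate_total_by_parent_py_alt (parent_lengths : List Int) (total_cap : Int) : List Int :=
  pvBLoop (max 0 total_cap)
    (parent_lengths.foldl (fun acc l => if 0 < l then acc + 1 else acc) 0)
    parent_lengths 0 0

-- ===== PRECONDITION & SPEC =====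
def Spec_allocate_total_by_parent_py (parent_lengths : List Int) (total_cap : Int) (out : List Int) : Prop := out = allocate_total_by_parent_py_alt parent_lengths total_cap
instance (parent_lengths : List Int) (total_cap : Int) (out : List Int) : Decidable (Spec_allocate_total_by_parent_py parent_lengths total_cap out) := by unfold Spec_allocate_total_by_parent_py; infer_instance

-- ===== CLAIM (what is proved, stated in full; the proofs are below) =====
def Claim_equal_allocate_total_by_parent_py : Prop := ∀ (parent_lengths : List Int) (total_cap : Int), Dom_allocate_total_by_parent_py parent_lengths total_cap → Spec_allocate_total_by_parent_py parent_lengths total_cap (allocate_total_by_parent_py parent_lengths total_cap)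

-- ===== LEMMAS AND PROOFS =====

-- proof-side intermediate forms: the list of positive-length indices, single-index
-- assignment, and a forward-fill; A's two passes are first characterised by these.
def pvPosOf (ps : List (Int × Int)) : List Int := (ps.filter (fun p => 0 < p.2)).map Prod.fst

def pvSet1 (a : List Int) (i : Int) : List Int := PySem.List.pySetD a i 1

def pvBFill : List Int → List Int → List Int → Int → List Int
  | [], _, alloc, _ => alloc
  | i :: rest, pl, alloc, leftover =>
    if leftover ≤ 0 then alloc
    else
      let extra := min (PySem.List.pyGetD pl i 0 - 1) leftover
      pvBFill rest pl (PySem.List.pySetD alloc i (PySem.List.pyGetD alloc i 0 + extra)) (leftover - extra)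

-- pyGetD/pySetD facts for nonnegative indices
theorem pvGetD_nonneg (l : List Int) (i : Int) (h : 0 ≤ i) :
    PySem.List.pyGetD l i 0 = l.getD i.toNat 0 := by
  rcases Int.eq_ofNat_of_zero_le h with ⟨n, rfl⟩; simp [PySem.List.pyGetD_natCast]

theorem pvGet_set_ne (a : List Int) (i j v : Int) (hi : 0 ≤ i) (hj : 0 ≤ j) (hne : i ≠ j) :
    PySem.List.pyGetD (PySem.List.pySetD a j v) i 0 = PySem.List.pyGetD a i 0 := by
  rw [PySem.List.pySetD_of_nonneg a v hj, pvGetD_nonneg _ _ hi, pvGetD_nonneg _ _ hi]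
  have : j.toNat ≠ i.toNat := by omega
  simp [List.getD, List.getElem?_set_ne this]

theorem pvSet_get_self (a : List Int) (i : Int) (hi : 0 ≤ i) (hlen : i.toNat < a.length) :
    PySem.List.pySetD a i (PySem.List.pyGetD a i 0) = a := by
  rw [PySem.List.pySetD_of_nonneg _ _ hi, pvGetD_nonneg _ _ hi]
  rw [List.getD_eq_getElem _ _ hlen, List.set_getElem_self]

-- cons-shift facts for the index-1 offset that peeling the head of the list induces
theorem pvGetD_cons_succ (a0 : Int) (arr : List Int) (j : Int) (hj : 0 ≤ j) :
    PySem.List.pyGetD (a0 :: arr) (j + 1) 0 = PySem.List.pyGetD arr j 0 := by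
  rw [pvGetD_nonneg _ _ (by omega), pvGetD_nonneg _ _ hj]
  have h1 : (j + 1).toNat = j.toNat + 1 := by omega
  rw [h1]; simp [List.getD]

theorem pvSetD_cons_succ (a0 : Int) (arr : List Int) (j v : Int) (hj : 0 ≤ j) :
    PySem.List.pySetD (a0 :: arr) (j + 1) v = a0 :: PySem.List.pySetD arr j v := by
  rw [PySem.List.pySetD_of_nonneg _ _ (by omega), PySem.List.pySetD_of_nonneg _ _ hj]
  have h1 : (j + 1).toNat = j.toNat + 1 := by omega
  rw [h1]; rfl

theorem pvSetD_zero_cons (a0 : Int) (arr : List Int) (v : Int) :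
    PySem.List.pySetD (a0 :: arr) 0 v = v :: arr := by
  rw [PySem.List.pySetD_of_nonneg _ _ le_rfl]; rfl

-- the positive-index list of a shifted enumeration is the shifted positive-index list
theorem pvPos_shift (pl : List Int) : ∀ s : Int,
    pvPosOf (PySem.List.enumerate pl (s + 1)) = (pvPosOf (PySem.List.enumerate pl s)).map (· + 1) := by
  induction pl with
  | nil => intro s; simp [pvPosOf]
  | cons l rest ih =>
    intro s
    rw [PySem.List.enumerate_cons, PySem.List.enumerate_cons]
    by_cases h : 0 < l
    · simp only [pvPosOf, List.filter_cons, decide_eq_true_eq]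
      simp only [h, if_pos, List.map_cons]
      have := ih (s + 1)
      simp only [pvPosOf] at this
      rw [this]
    · simp only [pvPosOf, List.filter_cons, decide_eq_true_eq]
      simp only [h, if_false]
      have := ih (s + 1)
      simp only [pvPosOf] at this
      rw [this]

theorem pvPos_cons (l : Int) (rest : List Int) :
    pvPosOf (PySem.List.enumerate (l :: rest) 0)
      = (if 0 < l then [(0 : Int)] else []) ++ (pvPosOf (PySem.List.enumerate rest 0)).map (· + 1) := by
  rw [PySem.List.enumerate_cons]
  have h01 : (0 : Int) + 1 = 0 + 1 := rfl
  have hsh := pvPos_shift rest 0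
  by_cases h : 0 < l
  · simp only [pvPosOf, List.filter_cons, decide_eq_true_eq, h, if_pos, List.map_cons]
    simp only [pvPosOf] at hsh
    rw [show (0:Int) + 1 = 0 + 1 from rfl] at hsh
    rw [hsh]; rfl
  · simp only [pvPosOf, List.filter_cons, decide_eq_true_eq, h, if_false]
    simp only [pvPosOf] at hsh
    rw [hsh]; rfl

theorem pvPos_nonneg (pl : List Int) : ∀ j ∈ pvPosOf (PySem.List.enumerate pl 0), 0 ≤ j := by
  intro j hj
  simp only [pvPosOf, List.mem_map] at hj
  obtain ⟨p, hp, rfl⟩ := hj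
  have := List.mem_filter.mp hp
  rcases (PySem.List.mem_enumerate_iff _ _ _).mp this.1 with ⟨k, hk, rfl⟩
  simp

theorem pvEnum_nodup (pl : List Int) : ((PySem.List.enumerate pl 0).map Prod.fst).Nodup := by
  have hp := PySem.List.pairwise_lt_enumerate pl 0
  have : ((PySem.List.enumerate pl 0).map Prod.fst).Pairwise (· < ·) :=
    (List.pairwise_map).mpr hp
  exact this.imp (fun h => ne_of_lt h)

-- characterization of A's first loop
theorem pvPhase1_char (ps : List (Int × Int)) (a : List Int) (rem : Int) (h : 0 ≤ rem) :
    pvAPhase1 ps a rem =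
      (((pvPosOf ps).take rem.toNat).foldl pvSet1 a, rem - min rem ((pvPosOf ps).length : Int)) := by
  induction ps generalizing a rem with
  | nil => simp [pvAPhase1, pvPosOf]; try omega
  | cons p rest ih =>
    obtain ⟨i, l⟩ := p
    by_cases hrem : rem ≤ 0
    · have : rem = 0 := le_antisymm hrem h
      subst this
      simp [pvAPhase1, pvPosOf]
      try omega
    · by_cases hl : l ≤ 0
      · have hcond : ¬ (0 < l) := by omega
        simp only [pvAPhase1, if_neg hrem, if_pos hl]
        rw [ih a rem h]
        simp [pvPosOf, hcond]
      · have hcond : 0 < l := by omega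
        simp only [pvAPhase1, if_neg hrem, if_neg hl]
        rw [ih _ (rem - 1) (by omega)]
        have hpos : pvPosOf ((i, l) :: rest) = i :: pvPosOf rest := by
          simp [pvPosOf, hcond]
        rw [hpos]
        have htake : (i :: pvPosOf rest).take rem.toNat
            = i :: (pvPosOf rest).take (rem - 1).toNat := by
          have h1 : rem.toNat = (rem - 1).toNat + 1 := by omega
          rw [h1, List.take_succ_cons]
        rw [htake]
        simp only [List.foldl, Prod.mk.injEq, pvSet1]
        refine ⟨trivial, ?_⟩
        simp only [List.length_cons]
        push_cast
        omega

-- leftover ≤ 0 stops the fill immediately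
theorem pvBFill_nonpos (js : List Int) (pl a : List Int) (leftover : Int) (h : leftover ≤ 0) :
    pvBFill js pl a leftover = a := by
  cases js with
  | nil => rfl
  | cons j rest => simp [pvBFill, h]

-- A's second loop equals the forward-fill, given the baseline invariants
theorem pvPhase2_eq_fill (pl : List Int) (ps : List (Int × Int)) (a : List Int) (rem : Int)
    (hrem : 0 < rem)
    (h1 : ∀ p ∈ ps, 0 ≤ p.1)
    (h2 : ∀ p ∈ ps, PySem.List.pyGetD pl p.1 0 = p.2)
    (hnd : (ps.map Prod.fst).Nodup)
    (hpos : ∀ p ∈ ps, 0 < p.2 → PySem.List.pyGetD a p.1 0 = 1 ∧ p.1.toNat < a.length)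
    (hz : ∀ p ∈ ps, p.2 ≤ 0 → PySem.List.pyGetD a p.1 0 = 0) :
    (pvAPhase2 ps a rem).1 = pvBFill (pvPosOf ps) pl a rem := by
  induction ps generalizing a rem with
  | nil => rfl
  | cons p rest ih =>
    obtain ⟨i, l⟩ := p
    have hmem : (i, l) ∈ (i, l) :: rest := List.mem_cons_self
    have hi : 0 ≤ i := h1 _ hmem
    have h1' : ∀ p ∈ rest, 0 ≤ p.1 := fun p hp => h1 p (List.mem_cons_of_mem _ hp)
    have h2' : ∀ p ∈ rest, PySem.List.pyGetD pl p.1 0 = p.2 := fun p hp => h2 p (List.mem_cons_of_mem _ hp)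
    have hnd' : (rest.map Prod.fst).Nodup := (List.nodup_cons.mp hnd).2
    have hinot : i ∉ rest.map Prod.fst := (List.nodup_cons.mp hnd).1
    by_cases hl : l ≤ 0
    · -- A skips (pcap = 0 since allocations[i] = 0); index i is not in pos
      have hga : PySem.List.pyGetD a i 0 = 0 := hz _ hmem hl
      have hpcap : max 0 (l - PySem.List.pyGetD a i 0) ≤ 0 := by rw [hga]; omega
      have hcond : ¬ (0 < l) := by omega
      simp only [pvAPhase2, if_pos hpcap]
      rw [ih a rem hrem h1' h2' hnd'
        (fun p hp hpp => hpos p (List.mem_cons_of_mem _ hp) hpp)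
        (fun p hp hpp => hz p (List.mem_cons_of_mem _ hp) hpp)]
      simp [pvPosOf, hcond]
    · have hcond : 0 < l := by omega
      obtain ⟨hga, hlen⟩ := hpos _ hmem hcond
      have hpl : PySem.List.pyGetD pl i 0 = l := h2 _ hmem
      have hposc : pvPosOf ((i, l) :: rest) = i :: pvPosOf rest := by
        simp [pvPosOf, hcond]
      rw [hposc]
      have hne : ∀ p ∈ rest, p.1 ≠ i := by
        intro p hp he
        exact hinot (he ▸ List.mem_map_of_mem hp)
      by_cases hl1 : l - 1 ≤ 0
      · -- parent_cap = 0: A skips; the fill adds extra = 0, writing back the unchanged value 1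
        have hpcap : max 0 (l - PySem.List.pyGetD a i 0) ≤ 0 := by rw [hga]; omega
        simp only [pvAPhase2, if_pos hpcap]
        have hextra : min (PySem.List.pyGetD pl i 0 - 1) rem = PySem.List.pyGetD a i 0 - 1 := by
          rw [hpl, hga]; omega
        simp only [pvBFill, if_neg (by omega : ¬ rem ≤ 0), hextra]
        have hset : PySem.List.pySetD a i (PySem.List.pyGetD a i 0 + (PySem.List.pyGetD a i 0 - 1)) = a := by
          have : PySem.List.pyGetD a i 0 + (PySem.List.pyGetD a i 0 - 1) = PySem.List.pyGetD a i 0 := by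
            rw [hga]; ring
          rw [this]; exact pvSet_get_self a i hi hlen
        rw [hset]
        have hrem' : rem - (PySem.List.pyGetD a i 0 - 1) = rem := by rw [hga]; ring
        rw [hrem']
        exact ih a rem hrem h1' h2' hnd'
          (fun p hp hpp => hpos p (List.mem_cons_of_mem _ hp) hpp)
          (fun p hp hpp => hz p (List.mem_cons_of_mem _ hp) hpp)
      · -- parent_cap = l - 1 > 0: both add extra = min (l-1) rem at index i
        have hpcap : ¬ (max 0 (l - PySem.List.pyGetD a i 0) ≤ 0) := by rw [hga]; omega
        have hmax : max 0 (l - PySem.List.pyGetD a i 0) = l - 1 := by rw [hga]; omega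
        simp only [pvAPhase2, hmax]
        rw [if_neg hl1]
        simp only [pvBFill, if_neg (by omega : ¬ rem ≤ 0), hpl]
        set extra := min (l - 1) rem with hextra
        set a' := PySem.List.pySetD a i (PySem.List.pyGetD a i 0 + extra) with ha'
        have hlen' : a'.length = a.length := PySem.List.length_pySetD ..
        by_cases hstop : rem - extra ≤ 0
        · simp only [if_pos hstop]
          rw [pvBFill_nonpos _ _ _ _ hstop]
        · simp only [if_neg hstop]
          refine ih a' (rem - extra) (by omega) h1' h2' hnd' ?_ ?_
          · intro p hp hpp
            have := hne p hp
            rw [pvGet_set_ne a p.1 i _ (h1' p hp) hi this]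
            obtain ⟨hv, hln⟩ := hpos p (List.mem_cons_of_mem _ hp) hpp
            exact ⟨hv, by omega⟩
          · intro p hp hpp
            rw [pvGet_set_ne a p.1 i _ (h1' p hp) hi (hne p hp)]
            exact hz p (List.mem_cons_of_mem _ hp) hpp

-- shifting every index by one peels the head of the arrays
theorem pvFoldSet1_shift : ∀ (js : List Int) (a0 : Int) (arr : List Int), (∀ j ∈ js, 0 ≤ j) →
    ((js.map (· + 1)).foldl pvSet1 (a0 :: arr)) = a0 :: js.foldl pvSet1 arr := by
  intro js
  induction js with
  | nil => intro a0 arr h; rfl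
  | cons j rest ih =>
    intro a0 arr h
    simp only [List.map_cons, List.foldl_cons]
    have hs : pvSet1 (a0 :: arr) (j + 1) = a0 :: pvSet1 arr j := by
      simp only [pvSet1]
      exact pvSetD_cons_succ a0 arr j 1 (h j List.mem_cons_self)
    rw [hs]
    exact ih a0 _ (fun x hx => h x (List.mem_cons_of_mem _ hx))

theorem pvBFill_shift : ∀ (js : List Int) (l : Int) (pl0 : List Int) (a0 : Int) (arr : List Int)
    (lo : Int), (∀ j ∈ js, 0 ≤ j) →
    pvBFill (js.map (· + 1)) (l :: pl0) (a0 :: arr) lo = a0 :: pvBFill js pl0 arr lo := by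
  intro js
  induction js with
  | nil => intro l pl0 a0 arr lo h; rfl
  | cons j rest ih =>
    intro l pl0 a0 arr lo h
    by_cases hlo : lo ≤ 0
    · simp [pvBFill, hlo]
    · have hj := h j List.mem_cons_self
      simp only [List.map_cons, pvBFill, if_neg hlo]
      rw [pvGetD_cons_succ _ _ _ hj, pvGetD_cons_succ _ _ _ hj, pvSetD_cons_succ _ _ _ _ hj]
      exact ih l pl0 _ _ _ (fun x hx => h x (List.mem_cons_of_mem _ hx))

-- the baseline array is the 0/1 indicator of positivity
theorem pvBase_eq (pl : List Int) :
    (pvPosOf (PySem.List.enumerate pl 0)).foldl pvSet1 (List.replicate pl.length 0)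
      = pl.map (fun l => if 0 < l then (1 : Int) else 0) := by
  induction pl with
  | nil => rfl
  | cons l rest ih =>
    rw [pvPos_cons]
    by_cases h : 0 < l
    · simp only [if_pos h, List.length_cons, List.replicate_succ, List.singleton_append,
        List.foldl_cons, List.map_cons]
      have h0 : pvSet1 ((0 : Int) :: List.replicate rest.length 0) 0
          = (1 : Int) :: List.replicate rest.length 0 := by
        simp only [pvSet1]; exact pvSetD_zero_cons _ _ _
      rw [h0, pvFoldSet1_shift _ _ _ (pvPos_nonneg rest), ih]
    · simp only [if_neg h, List.nil_append, List.length_cons, List.replicate_succ, List.map_cons]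
      rw [pvFoldSet1_shift _ _ _ (pvPos_nonneg rest), ih]

-- B's running positive-count equals the length of the positive-index list
theorem pvNpos_eq (pl : List Int) : ∀ (s acc : Int),
    pl.foldl (fun acc l => if 0 < l then acc + 1 else acc) acc
      = acc + ((pvPosOf (PySem.List.enumerate pl s)).length : Int) := by
  induction pl with
  | nil => intro s acc; simp [pvPosOf]
  | cons l rest ih =>
    intro s acc
    rw [PySem.List.enumerate_cons]
    by_cases h : 0 < l
    · have hc : pvPosOf ((s, l) :: PySem.List.enumerate rest (s + 1))
          = s :: pvPosOf (PySem.List.enumerate rest (s + 1)) := by simp [pvPosOf, h]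
      simp only [List.foldl_cons, if_pos h, hc, List.length_cons]
      rw [ih (s + 1) (acc + 1)]
      push_cast; ring
    · have hc : pvPosOf ((s, l) :: PySem.List.enumerate rest (s + 1))
          = pvPosOf (PySem.List.enumerate rest (s + 1)) := by simp [pvPosOf, h]
      simp only [List.foldl_cons, if_neg h, hc]
      exact ih (s + 1) acc

-- regime cap < npos: B's loop builds the take-pre baseline
theorem pvR1 (cap npos : Int) (hlt : cap < npos) :
    ∀ (pl : List Int) (seen pr : Int),
      pvBLoop cap npos pl seen pr
        = ((pvPosOf (PySem.List.enumerate pl 0)).take (cap - seen).toNat).foldl pvSet1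
            (List.replicate pl.length 0) := by
  intro pl
  induction pl with
  | nil => intro seen pr; simp [pvBLoop, pvPosOf]
  | cons l rest ih =>
    intro seen pr
    rw [pvPos_cons]
    have hnn : ∀ j ∈ (pvPosOf (PySem.List.enumerate rest 0)).take (cap - seen).toNat, 0 ≤ j :=
      fun j hj => pvPos_nonneg rest j (List.mem_of_mem_take hj)
    by_cases h : l ≤ 0
    · have hc : ¬ (0 < l) := by omega
      simp only [pvBLoop, if_pos h, if_neg hc, List.nil_append, List.length_cons,
        List.replicate_succ, ← List.map_take]
      rw [pvFoldSet1_shift _ _ _ hnn]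
      rw [ih seen pr]
    · have h' : 0 < l := by omega
      simp only [pvBLoop, if_neg h, if_pos hlt, if_pos h', List.singleton_append,
        List.length_cons, List.replicate_succ]
      by_cases hs : seen < cap
      · have ht : (cap - seen).toNat = (cap - (seen + 1)).toNat + 1 := by omega
        rw [if_pos hs, ht, List.take_succ_cons]
        simp only [List.foldl_cons]
        have h0 : pvSet1 ((0 : Int) :: List.replicate rest.length 0) 0
            = (1 : Int) :: List.replicate rest.length 0 := by
          simp only [pvSet1]; exact pvSetD_zero_cons _ _ _
        rw [h0, ← List.map_take,
          pvFoldSet1_shift _ _ _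
            (fun j hj => pvPos_nonneg rest j (List.mem_of_mem_take hj)),
          ih (seen + 1) pr]
      · have ht : (cap - seen).toNat = 0 := by omega
        have ht' : (cap - (seen + 1)).toNat = 0 := by omega
        rw [if_neg hs, ht, List.take_zero]
        simp only [List.foldl_nil]
        rw [ih (seen + 1) pr, ht', List.take_zero]
        simp only [List.foldl_nil]
    -- (both zero-take branches reduce to 0 :: replicate)

-- regime cap ≥ npos: B's loop is the baseline plus forward-fill
theorem pvR2 (cap npos : Int) (hge : ¬ cap < npos) :
    ∀ (pl : List Int) (seen pr : Int),
      pvBLoop cap npos pl seen pr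
        = pvBFill (pvPosOf (PySem.List.enumerate pl 0)) pl
            (pl.map (fun l => if 0 < l then (1 : Int) else 0)) (max 0 (cap - npos - pr)) := by
  intro pl
  induction pl with
  | nil => intro seen pr; simp [pvBLoop, pvPosOf, pvBFill]
  | cons l rest ih =>
    intro seen pr
    rw [pvPos_cons]
    by_cases h : l ≤ 0
    · have hc : ¬ (0 < l) := by omega
      simp only [pvBLoop, if_pos h, if_neg hc, List.nil_append, List.map_cons]
      rw [pvBFill_shift _ _ _ _ _ _ (pvPos_nonneg rest)]
      exact congrArg (0 :: ·) (ih seen pr)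
    · have h' : 0 < l := by omega
      simp only [pvBLoop, if_neg h, if_neg hge, if_pos h', List.map_cons, List.singleton_append]
      set X := cap - npos - pr with hX
      by_cases hx : X ≤ 0
      · have hm : max 0 X = 0 := by omega
        rw [hm, pvBFill_nonpos _ _ _ _ le_rfl]
        have hhead : 1 + max 0 (min (l - 1) X) = (1 : Int) := by omega
        rw [hhead]
        have htail : pvBLoop cap npos rest (seen + 1) (pr + (l - 1))
            = rest.map (fun l => if 0 < l then (1 : Int) else 0) := by
          rw [ih (seen + 1) (pr + (l - 1))]
          have : max 0 (cap - npos - (pr + (l - 1))) = 0 := by omega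
          rw [this, pvBFill_nonpos _ _ _ _ le_rfl]
        rw [htail]
      · have hm : max 0 X = X := by omega
        rw [hm]
        simp only [pvBFill, if_neg hx, PySem.List.pyGetD_zero_cons, pvSetD_zero_cons]
        rw [pvBFill_shift _ _ _ _ _ _ (pvPos_nonneg rest)]
        have hhead : 1 + max 0 (min (l - 1) X) = 1 + min (l - 1) X := by omega
        rw [hhead]
        have htail : pvBLoop cap npos rest (seen + 1) (pr + (l - 1))
            = pvBFill (pvPosOf (PySem.List.enumerate rest 0)) rest
                (rest.map (fun l => if 0 < l then (1 : Int) else 0)) (X - min (l - 1) X) := by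
          rw [ih (seen + 1) (pr + (l - 1))]
          have : max 0 (cap - npos - (pr + (l - 1))) = X - min (l - 1) X := by omega
          rw [this]
        rw [htail]

-- the two ports agree
theorem pvMain (pl : List Int) (tc : Int) :
    allocate_total_by_parent_py pl tc = allocate_total_by_parent_py_alt pl tc := by
  have hcap : (0 : Int) ≤ max 0 tc := le_max_left _ _
  have hmapconst : pl.map (fun _ => (0 : Int)) = List.replicate pl.length 0 := List.map_const' ..
  simp only [allocate_total_by_parent_py, allocate_total_by_parent_py_alt]
  rw [hmapconst]
  set cap := max 0 tc with hc
  set pos := pvPosOf (PySem.List.enumerate pl 0) with hposdef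
  have hnp : pl.foldl (fun acc l => if 0 < l then acc + 1 else acc) 0 = (pos.length : Int) := by
    have := pvNpos_eq pl 0 0; simpa using this
  rw [hnp]
  by_cases h0 : cap ≤ 0
  · rw [if_pos h0]
    have hcap0 : cap = 0 := le_antisymm h0 hcap
    by_cases hlt : cap < (pos.length : Int)
    · rw [pvR1 cap _ hlt pl 0 0]
      have : (cap - 0).toNat = 0 := by omega
      rw [this, List.take_zero]
      simp only [List.foldl_nil]
    · rw [pvR2 cap _ hlt pl 0 0]
      have hlen0 : pos = [] := by
        have h' : (pos.length : Int) ≤ 0 := le_trans (not_lt.mp hlt) h0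
        have : pos.length = 0 := by omega
        exact List.length_eq_zero_iff.mp this
      have hbase := pvBase_eq pl
      rw [← hposdef, hlen0] at hbase
      simp only [List.foldl_nil] at hbase
      rw [← hposdef, hlen0, pvBFill_nonpos _ _ _ _ (by omega), ← hbase]
  · rw [if_neg h0]
    have h0' : 0 < cap := lt_of_not_ge h0
    rw [pvPhase1_char (PySem.List.enumerate pl 0) _ cap hcap]
    dsimp only
    by_cases hlt : cap < (pos.length : Int)
    · have hmin : min cap (pos.length : Int) = cap := min_eq_left (le_of_lt hlt)
      rw [← hposdef, hmin, if_pos (by omega : cap - cap ≤ 0), pvR1 cap _ hlt pl 0 0]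
      have : cap - 0 = cap := by ring
      rw [this]
    · have hle : (pos.length : Int) ≤ cap := not_lt.mp hlt
      have hmin : min cap (pos.length : Int) = (pos.length : Int) := min_eq_right hle
      rw [← hposdef, hmin]
      have htake : pos.take cap.toNat = pos := List.take_of_length_le (by omega)
      rw [htake]
      by_cases hz2 : cap - (pos.length : Int) ≤ 0
      · rw [if_pos hz2, pvR2 cap _ hlt pl 0 0]
        have hm0 : max 0 (cap - (pos.length : Int) - 0) = 0 := by omega
        rw [← hposdef, hm0, pvBFill_nonpos _ _ _ _ le_rfl]
        have hbase := pvBase_eq pl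
        rw [← hposdef] at hbase
        exact hbase
      · rw [if_neg hz2]
        have hbase := pvBase_eq pl
        rw [← hposdef] at hbase
        rw [hbase]
        have hfill := pvPhase2_eq_fill pl (PySem.List.enumerate pl 0)
            (pl.map (fun l => if 0 < l then (1 : Int) else 0)) (cap - (pos.length : Int))
            (by omega) ?_ ?_ (pvEnum_nodup pl) ?_ ?_
        · rw [hfill, ← hposdef, pvR2 cap _ hlt pl 0 0, ← hposdef]
          have : max 0 (cap - (pos.length : Int) - 0) = cap - (pos.length : Int) := by omega
          rw [this]
        · intro p hp
          rcases (PySem.List.mem_enumerate_iff _ _ _).mp hp with ⟨k, hk, rfl⟩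
          simp
        · intro p hp
          rcases (PySem.List.mem_enumerate_iff _ _ _).mp hp with ⟨k, hk, rfl⟩
          simp [PySem.List.pyGetD_natCast, List.getD, List.getElem?_eq_getElem hk]
        · intro p hp hpp
          rcases (PySem.List.mem_enumerate_iff _ _ _).mp hp with ⟨k, hk, rfl⟩
          simp only [zero_add] at hpp ⊢
          constructor
          · simp [PySem.List.pyGetD_natCast, List.getD, List.getElem?_map,
              List.getElem?_eq_getElem hk, hpp]
          · simp only [List.length_map, Int.toNat_natCast]; omega
        · intro p hp hpp
          rcases (PySem.List.mem_enumerate_iff _ _ _).mp hp with ⟨k, hk, rfl⟩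
          simp only [zero_add] at hpp ⊢
          have hnp' : ¬ (0 < pl[k]) := by omega
          simp [PySem.List.pyGetD_natCast, List.getD, List.getElem?_map,
            List.getElem?_eq_getElem hk, hnp']

-- ===== VERDICT (by name: the statement is the Claim_ definition above) =====
theorem allocate_total_by_parent_py_spec : Claim_equal_allocate_total_by_parent_py := by
  intro pl tc _
  exact pvMain pl tc
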